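-- pv_equiv track=rewrite | github.com/AlexeyBgsl/azure_testing | translate.py | get_identifier
-- ===== SOURCE A (Python) =====
-- def get_identifier(s):
--     identifier = ''
--     for c in s:
--         i = identifier + c
--         if i.isidentifier():
--             identifier = i
--         else:
--             break
--     return identifier
-- ===== SOURCE B (Python) =====
-- def get_identifier(s):
--     # Binary search the largest L with s[:L].isidentifier() (prefix validity is monotone for L >= 1).
--     lo, hi = 0, len(s)
--     while lo < hi:
--         mid = (lo + hi + 1) // 2
--         if s[:mid].isidentifier():
--             lo = mid
--         else:
--             hi = mid - 1
--     return s[:lo]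
-- ===== Notes on version B (the rewrite author's own statement) =====
-- stated objective: faster
-- what changed: Replaces A's left-to-right scan that re-validates the whole growing prefix with isidentifier() at every character by a binary search over the prefix length, exploiting that prefix validity is monotone for lengths >= 1.
import Mathlib
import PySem

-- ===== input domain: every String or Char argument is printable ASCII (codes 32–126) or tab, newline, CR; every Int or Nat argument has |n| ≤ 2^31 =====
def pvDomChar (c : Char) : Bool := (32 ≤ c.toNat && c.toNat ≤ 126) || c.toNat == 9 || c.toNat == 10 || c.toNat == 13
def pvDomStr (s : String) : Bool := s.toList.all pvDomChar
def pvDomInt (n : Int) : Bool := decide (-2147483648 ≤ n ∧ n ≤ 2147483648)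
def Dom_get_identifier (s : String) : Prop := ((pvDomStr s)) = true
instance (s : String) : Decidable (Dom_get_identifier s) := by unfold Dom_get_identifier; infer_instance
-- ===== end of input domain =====

-- B replaces A's quadratic grow-and-revalidate scan by a binary search over the prefix length
-- (prefix validity is monotone for lengths ≥ 1); faster.

-- str.isidentifier(), hand-ported (exact on the ASCII domain: start = letter or '_',
-- continue = letter, digit or '_'; the empty string is not an identifier).
def pyIdStart (c : Char) : Bool := PySem.Chars.isalpha c || c == '_'
def pyIdCont (c : Char) : Bool := PySem.Chars.isalnum c || c == '_'
def pyIsidentifier (l : List Char) : Bool :=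
  match l with
  | [] => false
  | c :: rest => pyIdStart c && rest.all pyIdCont

-- ===== PORT A =====
-- the 'for c in s' loop with break: state = accumulated identifier (as List Char)
def pvGoA : List Char → List Char → List Char
  | [], identifier => identifier
  | c :: rest, identifier =>
      let i := identifier ++ [c]
      if pyIsidentifier i then pvGoA rest i else identifier

def get_identifier (s : String) : String := String.ofList (pvGoA s.toList [])

-- ===== PORT B =====
-- while lo < hi: mid = (lo+hi+1)//2; test s[:mid].isidentifier()
def pvBS (cs : List Char) (lo hi : Nat) : Nat :=
  if _h : lo < hi then
    let mid := (lo + hi + 1) / 2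
    if pyIsidentifier (cs.take mid) then pvBS cs mid hi else pvBS cs lo (mid - 1)
  else lo
termination_by hi - lo
decreasing_by all_goals omega

def get_identifier_alt (s : String) : String :=
  let lo := pvBS s.toList 0 s.toList.length
  String.ofList (s.toList.take lo)  -- s[:lo], lo ≥ 0

-- ===== PRECONDITION & SPEC =====
def Spec_get_identifier (s : String) (out : String) : Prop := out = get_identifier_alt s
instance (s : String) (out : String) : Decidable (Spec_get_identifier s out) := by unfold Spec_get_identifier; infer_instance

-- ===== CLAIM (what is proved, stated in full; the proofs are below) =====
def Claim_equal_get_identifier : Prop := ∀ (s : String), Dom_get_identifier s → Spec_get_identifier s (get_identifier s)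

-- ===== LEMMAS AND PROOFS =====

-- the common value: length of the longest valid identifier prefix
def pvL (cs : List Char) : Nat :=
  match cs with
  | [] => 0
  | c :: rest => if pyIdStart c then 1 + (rest.takeWhile pyIdCont).length else 0

theorem pv_all_take_iff (p : Char → Bool) (l : List Char) (j : Nat) (hj : j ≤ l.length) :
    ((l.take j).all p = true) ↔ j ≤ (l.takeWhile p).length := by
  induction l generalizing j with
  | nil => simp_all
  | cons c l ih =>
    cases j with
    | zero => simp
    | succ j =>
      simp only [List.take_succ_cons, List.all_cons, Bool.and_eq_true, List.takeWhile]
      cases hpc : p c with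
      | false => simp
      | true =>
        simp only [List.length_cons, Nat.add_le_add_iff_right, true_and]
        exact ih j (by simpa using hj)

-- validity of the k-prefix (1 ≤ k ≤ length) ↔ k ≤ pvL
theorem pv_ok_iff (cs : List Char) (k : Nat) (h1 : 1 ≤ k) (h2 : k ≤ cs.length) :
    pyIsidentifier (cs.take k) = true ↔ k ≤ pvL cs := by
  cases cs with
  | nil => simp at h2; omega
  | cons c rest =>
    cases k with
    | zero => omega
    | succ k =>
      simp only [List.take_succ_cons, pyIsidentifier, pvL, Bool.and_eq_true]
      by_cases hs : pyIdStart c = true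
      · simp only [hs, if_true, true_and]
        rw [pv_all_take_iff pyIdCont rest k (by simpa using h2)]
        omega
      · simp [hs]

-- binary search returns pvL when the invariant holds
theorem pvBS_eq (cs : List Char) (lo hi : Nat) (hlo : lo ≤ pvL cs) (hhi : pvL cs ≤ hi)
    (hlen : hi ≤ cs.length) : pvBS cs lo hi = pvL cs := by
  by_cases h : lo < hi
  · rw [pvBS, dif_pos h]
    have hmid1 : lo < (lo + hi + 1) / 2 := by omega
    have hmid2 : (lo + hi + 1) / 2 ≤ hi := by omega
    rw [show (if pyIsidentifier (cs.take ((lo + hi + 1) / 2)) = true then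
        pvBS cs ((lo + hi + 1) / 2) hi else pvBS cs lo ((lo + hi + 1) / 2 - 1)) =
        _ from rfl]
    by_cases hok : pyIsidentifier (cs.take ((lo + hi + 1) / 2)) = true
    · rw [if_pos hok]
      have := (pv_ok_iff cs _ (by omega) (by omega)).mp hok
      exact pvBS_eq cs _ hi this hhi hlen
    · rw [if_neg hok]
      have : ¬ ((lo + hi + 1) / 2 ≤ pvL cs) := fun hle =>
        hok ((pv_ok_iff cs _ (by omega) (by omega)).mpr hle)
      exact pvBS_eq cs lo _ hlo (by omega) (by omega)
  · rw [pvBS, dif_neg h]; omega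
termination_by hi - lo
decreasing_by all_goals omega

theorem pv_take_takeWhile (p : Char → Bool) (l : List Char) :
    l.take ((l.takeWhile p).length) = l.takeWhile p := by
  induction l with
  | nil => simp
  | cons c l ih =>
    cases hc : p c with
    | false => simp [hc]
    | true => simp [hc, ih]

-- A's loop, once the accumulator is a valid identifier, just appends the idCont-run
theorem pvGoA_run (rest acc : List Char) (hacc : pyIsidentifier acc = true) :
    pvGoA rest acc = acc ++ rest.takeWhile pyIdCont := by
  induction rest generalizing acc with
  | nil => simp [pvGoA]
  | cons c rest ih =>
    obtain ⟨a, t, rfl⟩ : ∃ a t, acc = a :: t := by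
      cases acc with
      | nil => simp [pyIsidentifier] at hacc
      | cons a t => exact ⟨a, t, rfl⟩
    simp only [pyIsidentifier, Bool.and_eq_true] at hacc
    simp only [pvGoA]
    cases hc : pyIdCont c with
    | false =>
      have hv : pyIsidentifier (a :: t ++ [c]) = false := by
        simp [pyIsidentifier, List.all_append, hc]
      simp only [List.cons_append] at hv ⊢
      simp [hv, hc]
    | true =>
      have hvalid : pyIsidentifier (a :: t ++ [c]) = true := by
        simp [pyIsidentifier, List.all_append, hc, hacc.1, hacc.2]
      simp only [List.cons_append] at hvalid ⊢
      rw [if_pos hvalid, ih _ hvalid]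
      simp [hc]

-- A computes the take of pvL
theorem pvGoA_eq (cs : List Char) : pvGoA cs [] = cs.take (pvL cs) := by
  cases cs with
  | nil => simp [pvGoA, pvL]
  | cons c rest =>
    simp only [pvGoA, List.nil_append, pvL]
    cases hs : pyIdStart c with
    | false => simp [pyIsidentifier, hs]
    | true =>
      have h1 : pyIsidentifier [c] = true := by simp [pyIsidentifier, hs]
      rw [if_pos h1, if_pos rfl, pvGoA_run _ _ h1]
      simp [Nat.add_comm 1, pv_take_takeWhile]

-- ===== VERDICT (by name: the statement is the Claim_ definition above) =====
theorem get_identifier_spec : Claim_equal_get_identifier := by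
  intro s _
  show get_identifier s = get_identifier_alt s
  unfold get_identifier get_identifier_alt
  have hL : pvL s.toList ≤ s.toList.length := by
    cases h : s.toList with
    | nil => simp [pvL]
    | cons c rest =>
      simp only [pvL, List.length_cons]
      split
      · have := (List.takeWhile_prefix (l := rest) (p := pyIdCont)).length_le
        omega
      · omega
  rw [pvBS_eq s.toList 0 s.toList.length (Nat.zero_le _) hL le_rfl, pvGoA_eq]
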